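-- pv_equiv track=rewrite | github.com/TLimoges33/Syn_OS | build/ai-security-wrapper.py | _heuristic_tool_suggestion
-- ===== SOURCE A (Python) =====
-- from typing import Dict, List, Optional, Any
--
-- def _heuristic_tool_suggestion(objective: str) -> List[str]:
--     """Fallback heuristic tool suggestions"""
--     objective_lower = objective.lower()
--
--     if any(word in objective_lower for word in ["scan", "discover", "reconnaissance", "recon"]):
--         return ["nmap", "masscan", "nikto", "gobuster"]
--     elif any(word in objective_lower for word in ["web", "application", "webapp"]):
--         return ["burpsuite", "zaproxy", "sqlmap", "nikto"]
--     elif any(word in objective_lower for word in ["exploit", "attack", "penetrate"]):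
--         return ["metasploit", "searchsploit", "exploit-db"]
--     elif any(word in objective_lower for word in ["password", "crack", "brute"]):
--         return ["hashcat", "john", "hydra", "crunch"]
--     elif any(word in objective_lower for word in ["wireless", "wifi", "802.11"]):
--         return ["aircrack-ng", "wifite", "kismet"]
--     elif any(word in objective_lower for word in ["forensic", "analysis", "investigate"]):
--         return ["volatility", "autopsy", "sleuthkit", "binwalk"]
--     else:
--         return ["nmap", "burpsuite", "wireshark", "metasploit"]
-- ===== SOURCE B (Python) =====
-- from typing import List
--
-- # Flat keyword -> rule-index map; the answer is the toolset of the MINIMAL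
-- # matched rule index (a full-scan min-aggregation, not a first-match ladder).
-- _KEYWORD_RULE = {
--     "scan": 0, "discover": 0, "reconnaissance": 0, "recon": 0,
--     "web": 1, "application": 1, "webapp": 1,
--     "exploit": 2, "attack": 2, "penetrate": 2,
--     "password": 3, "crack": 3, "brute": 3,
--     "wireless": 4, "wifi": 4, "802.11": 4,
--     "forensic": 5, "analysis": 5, "investigate": 5,
-- }
--
-- _TOOLSETS = [
--     ["nmap", "masscan", "nikto", "gobuster"],
--     ["burpsuite", "zaproxy", "sqlmap", "nikto"],
--     ["metasploit", "searchsploit", "exploit-db"],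
--     ["hashcat", "john", "hydra", "crunch"],
--     ["aircrack-ng", "wifite", "kismet"],
--     ["volatility", "autopsy", "sleuthkit", "binwalk"],
--     ["nmap", "burpsuite", "wireshark", "metasploit"],
-- ]
--
--
-- def _heuristic_tool_suggestion(objective: str) -> List[str]:
--     objective_lower = objective.lower()
--     idx = len(_TOOLSETS) - 1
--     for kw, r in _KEYWORD_RULE.items():
--         if kw in objective_lower:
--             idx = min(idx, r)
--     return list(_TOOLSETS[idx])
-- ===== Notes on version B (the rewrite author's own statement) =====
-- stated objective: alternative
-- what changed: Replaced the first-match if/elif ladder by a min-aggregation: a flat keyword-to-rule-index map is scanned in full, the minimal matched rule index is taken (default = last), and the answer is read from an indexed toolset table.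
import Mathlib
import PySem

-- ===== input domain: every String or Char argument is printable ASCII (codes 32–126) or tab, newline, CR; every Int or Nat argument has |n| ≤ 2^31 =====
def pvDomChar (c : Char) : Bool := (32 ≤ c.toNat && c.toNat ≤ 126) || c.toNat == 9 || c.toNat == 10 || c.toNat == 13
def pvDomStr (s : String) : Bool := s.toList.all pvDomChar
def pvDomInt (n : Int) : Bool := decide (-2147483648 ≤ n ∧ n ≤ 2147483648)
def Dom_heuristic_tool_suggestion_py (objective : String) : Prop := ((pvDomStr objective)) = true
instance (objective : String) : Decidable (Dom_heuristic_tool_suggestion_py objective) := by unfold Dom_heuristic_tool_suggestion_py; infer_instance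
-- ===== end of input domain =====

-- B replaces A's first-match if/elif ladder by a min-aggregation over a flat
-- keyword→rule-index map with an indexed toolset table (alternative; same cost).


-- ===== PORT A =====
def heuristic_tool_suggestion_py (objective : String) : List String :=
  let objective_lower := PySem.Str.lower objective
  if ["scan", "discover", "reconnaissance", "recon"].any (fun word => PySem.Str.isIn word objective_lower) then
    ["nmap", "masscan", "nikto", "gobuster"]
  else if ["web", "application", "webapp"].any (fun word => PySem.Str.isIn word objective_lower) then
    ["burpsuite", "zaproxy", "sqlmap", "nikto"]
  else if ["exploit", "attack", "penetrate"].any (fun word => PySem.Str.isIn word objective_lower) then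
    ["metasploit", "searchsploit", "exploit-db"]
  else if ["password", "crack", "brute"].any (fun word => PySem.Str.isIn word objective_lower) then
    ["hashcat", "john", "hydra", "crunch"]
  else if ["wireless", "wifi", "802.11"].any (fun word => PySem.Str.isIn word objective_lower) then
    ["aircrack-ng", "wifite", "kismet"]
  else if ["forensic", "analysis", "investigate"].any (fun word => PySem.Str.isIn word objective_lower) then
    ["volatility", "autopsy", "sleuthkit", "binwalk"]
  else
    ["nmap", "burpsuite", "wireshark", "metasploit"]

-- ===== PORT B =====
-- flat keyword → rule-index map (Source B's _KEYWORD_RULE, insertion order)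
def pvKeywordRule : List (String × Nat) := [
  ("scan", 0), ("discover", 0), ("reconnaissance", 0), ("recon", 0),
  ("web", 1), ("application", 1), ("webapp", 1),
  ("exploit", 2), ("attack", 2), ("penetrate", 2),
  ("password", 3), ("crack", 3), ("brute", 3),
  ("wireless", 4), ("wifi", 4), ("802.11", 4),
  ("forensic", 5), ("analysis", 5), ("investigate", 5)]

def pvToolsets : List (List String) := [
  ["nmap", "masscan", "nikto", "gobuster"],
  ["burpsuite", "zaproxy", "sqlmap", "nikto"],
  ["metasploit", "searchsploit", "exploit-db"],
  ["hashcat", "john", "hydra", "crunch"],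
  ["aircrack-ng", "wifite", "kismet"],
  ["volatility", "autopsy", "sleuthkit", "binwalk"],
  ["nmap", "burpsuite", "wireshark", "metasploit"]]

-- Source B's loop: running minimum of the matched rule indices, default last slot
def heuristic_tool_suggestion_py_alt (objective : String) : List String :=
  let objective_lower := PySem.Str.lower objective
  let idx := pvKeywordRule.foldl
    (fun idx p => if PySem.Str.isIn p.1 objective_lower then min idx p.2 else idx)
    (pvToolsets.length - 1)
  pvToolsets.getD idx []

-- ===== PRECONDITION & SPEC =====
def Spec_heuristic_tool_suggestion_py (objective : String) (out : List String) : Prop := out = heuristic_tool_suggestion_py_alt objective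
instance (objective : String) (out : List String) : Decidable (Spec_heuristic_tool_suggestion_py objective out) := by unfold Spec_heuristic_tool_suggestion_py; infer_instance

-- ===== CLAIM (what is proved, stated in full; the proofs are below) =====
def Claim_equal_heuristic_tool_suggestion_py : Prop := ∀ (objective : String), Dom_heuristic_tool_suggestion_py objective → Spec_heuristic_tool_suggestion_py objective (heuristic_tool_suggestion_py objective)

-- ===== LEMMAS AND PROOFS =====

-- one keyword group (all mapped to the same index i): the running min drops to
-- min acc i exactly when some keyword of the group matches
theorem pv_grp (ol : String) (ks : List String) (i acc : Nat) :
    List.foldl (fun a p => if PySem.Str.isIn p.1 ol then min a p.2 else a) acc (ks.map (fun k => (k, i)))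
      = if ks.any (fun w => PySem.Str.isIn w ol) then min acc i else acc := by
  induction ks generalizing acc with
  | nil => simp
  | cons k t ih =>
    simp only [List.map_cons, List.foldl_cons, List.any_cons]
    by_cases hk : PySem.Str.isIn k ol = true
    · rw [if_pos hk, ih]
      simp only [hk, Bool.true_or]
      rw [if_pos trivial]
      split_ifs <;> omega
    · rw [if_neg hk, ih]
      simp only [Bool.eq_false_iff.mpr hk, Bool.false_or]

-- the flat map is the concatenation of its six constant-index groups
theorem pv_rules_eq :
    pvKeywordRule =
      (["scan", "discover", "reconnaissance", "recon"].map (fun k => (k, 0)))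
      ++ (["web", "application", "webapp"].map (fun k => (k, 1)))
      ++ (["exploit", "attack", "penetrate"].map (fun k => (k, 2)))
      ++ (["password", "crack", "brute"].map (fun k => (k, 3)))
      ++ (["wireless", "wifi", "802.11"].map (fun k => (k, 4)))
      ++ (["forensic", "analysis", "investigate"].map (fun k => (k, 5))) := rfl

-- ===== VERDICT (by name: the statement is the Claim_ definition above) =====
theorem heuristic_tool_suggestion_py_spec : Claim_equal_heuristic_tool_suggestion_py := by
  intro objective _
  unfold Spec_heuristic_tool_suggestion_py
  unfold heuristic_tool_suggestion_py heuristic_tool_suggestion_py_alt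
  rw [pv_rules_eq]
  simp only [List.foldl_append, pv_grp]
  set ol := PySem.Str.lower objective with hol
  set c1 := ["scan", "discover", "reconnaissance", "recon"].any (fun w => PySem.Str.isIn w ol) with hc1
  set c2 := ["web", "application", "webapp"].any (fun w => PySem.Str.isIn w ol) with hc2
  set c3 := ["exploit", "attack", "penetrate"].any (fun w => PySem.Str.isIn w ol) with hc3
  set c4 := ["password", "crack", "brute"].any (fun w => PySem.Str.isIn w ol) with hc4
  set c5 := ["wireless", "wifi", "802.11"].any (fun w => PySem.Str.isIn w ol) with hc5
  set c6 := ["forensic", "analysis", "investigate"].any (fun w => PySem.Str.isIn w ol) with hc6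
  clear hc1 hc2 hc3 hc4 hc5 hc6 hol
  cases c1 <;> cases c2 <;> cases c3 <;> cases c4 <;> cases c5 <;> cases c6 <;> rfl
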